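-- pv_equiv track=rewrite | github.com/ssMinji/Algorithms | sheep.py | solution
-- ===== SOURCE A (Python) =====
-- from itertools import combinations
--
-- def solution(A, X):
--     cand = {}
--     cnt = 0
--     for i in A:
--         if i not in cand and A.count(i) >= 2:
--             cand[i] = A.count(i)
--             if A.count(i) >= 4:
--                 possible = i ** 2
--
--                 if possible >= X:
--                     cnt += 1
--
--     for l in list(combinations(cand.keys(), 2)):
--         possible = l[0] * l[1]
--
--         if possible >= X:
--             cnt += 1
--
--     if cnt >= 1000000000:
--         return -1
--     else:
--         return  cnt
-- ===== SOURCE B (Python) =====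
-- def lower_bound(L, t, hi):
--     # first index in L[0:hi] with L[idx] >= t (L sorted ascending); O(log hi)
--     lo = 0
--     while lo < hi:
--         mid = (lo + hi) // 2
--         if L[mid] < t:
--             lo = mid + 1
--         else:
--             hi = mid
--     return lo
--
-- def solution(A, X):
--     counts = {}
--     for v in A:
--         counts[v] = counts.get(v, 0) + 1
--     cand = sorted(v for v, c in counts.items() if c >= 2)
--     cnt = 0
--     for v in cand:
--         if counts[v] >= 4 and v * v >= X:
--             cnt += 1
--     for j, c in enumerate(cand):
--         if c > 0:
--             # b*c >= X  <=>  b >= ceil(X/c)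
--             cnt += j - lower_bound(cand, -((-X) // c), j)
--         elif c < 0:
--             # b*c >= X  <=>  b <= X//c  <=>  b < X//c + 1
--             cnt += lower_bound(cand, X // c + 1, j)
--         else:
--             if X <= 0:
--                 cnt += j
--     return -1 if cnt >= 1000000000 else cnt
-- ===== Notes on version B (the rewrite author's own statement) =====
-- stated objective: faster
-- what changed: B builds a frequency dict in one pass instead of A's repeated full-list A.count scans, then sorts the candidate values and, for each candidate, binary-searches (a hand-written lower_bound) the threshold partner among the earlier sorted candidates — replacing A's enumeration of all itertools.combinations pairs by O(log k) per candidate, with sign-split ceil/floor thresholds for positive, negative and zero candidates.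
import Mathlib
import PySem

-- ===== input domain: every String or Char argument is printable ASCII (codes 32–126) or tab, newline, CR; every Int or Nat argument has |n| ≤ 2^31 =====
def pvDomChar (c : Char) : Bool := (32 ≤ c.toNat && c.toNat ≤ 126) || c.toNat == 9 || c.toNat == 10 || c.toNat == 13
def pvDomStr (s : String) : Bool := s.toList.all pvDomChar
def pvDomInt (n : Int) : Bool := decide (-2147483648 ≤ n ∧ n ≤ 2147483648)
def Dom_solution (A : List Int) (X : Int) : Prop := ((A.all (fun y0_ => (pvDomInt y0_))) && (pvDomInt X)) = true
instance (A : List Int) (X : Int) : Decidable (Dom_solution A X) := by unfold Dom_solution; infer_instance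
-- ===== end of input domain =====

-- B replaces A's repeated full-list A.count scans by one frequency-dict pass and counts the
-- qualifying pairs by sorting the candidates and binary-searching the threshold partner for each
-- candidate, instead of enumerating all pairs (objective: faster).

-- ===== PORT A =====
-- itertools.combinations(keys, 2), literally: all (keys[i], keys[j]) with i < j, in order.
def pvCombs2 : List Int → List (Int × Int)
  | [] => []
  | x :: xs => xs.map (fun y => (x, y)) ++ pvCombs2 xs

-- the body of A's first for-loop (state = (cand, cnt))
def pvStepA (A : List Int) (X : Int) (st : PySem.Dict Int Int × Int) (i : Int) :
    PySem.Dict Int Int × Int :=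
  if st.1.contains i = false ∧ 2 ≤ PySem.List.count A i then
    let cand := st.1.insert i (PySem.List.count A i : Int)
    if 4 ≤ PySem.List.count A i then
      if X ≤ i ^ 2 then (cand, st.2 + 1) else (cand, st.2)
    else (cand, st.2)
  else st

def solution (A : List Int) (X : Int) : Int :=
  let st := A.foldl (pvStepA A X) (PySem.Dict.empty, 0)
  let cnt := (pvCombs2 st.1.keys).foldl (fun c l => if X ≤ l.1 * l.2 then c + 1 else c) st.2
  if 1000000000 ≤ cnt then -1 else cnt

-- ===== PORT B =====
-- lower_bound(L, t, hi): first index in L[0:hi] with L[idx] >= t; L[mid] is always in range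
-- (lo < hi ≤ len L at every call), so List.getD is exact here.
def pvLB (S : List Int) (t : Int) (lo hi : Nat) : Nat :=
  if lo < hi then
    let mid := (lo + hi) / 2
    if S.getD mid 0 < t then pvLB S t (mid + 1) hi else pvLB S t lo mid
  else lo
termination_by hi - lo
decreasing_by all_goals omega

def solution_alt (A : List Int) (X : Int) : Int :=
  let counts := A.foldl (fun (d : PySem.Dict Int Int) v => d.insert v (d.getD v 0 + 1)) PySem.Dict.empty
  let cand := PySem.List.sorted ((counts.items.filter (fun p => 2 ≤ p.2)).map (fun p => p.1)) (fun x => x) false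
  let cnt := cand.foldl (fun c v => if 4 ≤ counts.getD v 0 ∧ X ≤ v * v then c + 1 else c) (0 : Int)
  -- enumerate index j is ≥ 0, so .toNat is exact
  let cnt := (PySem.List.enumerate cand).foldl (fun c p =>
      if 0 < p.2 then c + (p.1 - (pvLB cand (-(PySem.Int.floordiv (-X) p.2)) 0 p.1.toNat : Int))
      else if p.2 < 0 then c + (pvLB cand (PySem.Int.floordiv X p.2 + 1) 0 p.1.toNat : Int)
      else if X ≤ 0 then c + p.1 else c) cnt
  if 1000000000 ≤ cnt then -1 else cnt

-- ===== PRECONDITION & SPEC =====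
def Spec_solution (A : List Int) (X : Int) (out : Int) : Prop := out = solution_alt A X
instance (A : List Int) (X : Int) (out : Int) : Decidable (Spec_solution A X out) := by unfold Spec_solution; infer_instance

-- ===== CLAIM (what is proved, stated in full; the proofs are below) =====
def Claim_equal_solution : Prop := ∀ (A : List Int) (X : Int), Dom_solution A X → Spec_solution A X (solution A X)

-- ===== LEMMAS AND PROOFS =====

-- pair count of a candidate list, head against rest (the normal form both sides reach)
def pvSuffixPairs (X : Int) : List Int → Int
  | [] => 0
  | a :: rest => ((rest.filter (fun b => decide (X ≤ a * b))).length : Int) + pvSuffixPairs X rest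

-- the distinct values of A seen so far (s) that occur at least twice, with their counts
def pvCandList (A : List Int) (s : List Int) : List Int :=
  s.filter (fun k => decide (2 ≤ A.count k))

def pvCandItems (A : List Int) (s : List Int) : List (Int × Int) :=
  (pvCandList A s).map (fun k => (k, (A.count k : Int)))

def pvSingles (A : List Int) (X : Int) (s : List Int) : Int :=
  (((s.filter (fun k => decide (4 ≤ A.count k) && decide (X ≤ k * k))).length : Int))

theorem pv_keys_candItems (A : List Int) (s : List Int) :
    (PySem.Dict.mk (pvCandItems A s)).keys = pvCandList A s := by
  simp [PySem.Dict.keys_mk, pvCandItems, List.map_map, Function.comp_def]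

theorem pv_contains_candItems (A : List Int) (s : List Int) (i : Int) :
    (PySem.Dict.mk (pvCandItems A s)).contains i = decide (i ∈ pvCandList A s) := by
  rw [PySem.Dict.contains_eq_decide_mem_keys, pv_keys_candItems]

theorem pv_stepA_eq (A : List Int) (X i : Int) (s : List Int) (c : Int) :
    pvStepA A X (PySem.Dict.mk (pvCandItems A s), c + pvSingles A X s) i
      = (PySem.Dict.mk (pvCandItems A (PySem.Set.add s i)),
         c + pvSingles A X (PySem.Set.add s i)) := by
  have hcon := pv_contains_candItems A s i
  by_cases hi : i ∈ s
  · have hadd : PySem.Set.add s i = s := by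
      simp [PySem.Set.add, PySem.Set.contains, hi]
    rw [hadd]
    by_cases h2 : 2 ≤ A.count i
    · have hmem : i ∈ pvCandList A s := by simp [pvCandList, hi, h2]
      unfold pvStepA
      simp [hcon, hmem]
    · unfold pvStepA
      simp [PySem.List.count_eq, h2]
  · have hadd : PySem.Set.add s i = s ++ [i] := by
      simp [PySem.Set.add, PySem.Set.contains, hi]
    have hni : i ∉ pvCandList A s := fun h => hi (List.mem_of_mem_filter h)
    have hconf : (PySem.Dict.mk (pvCandItems A s)).contains i = false := by
      simp [hcon, hni]
    rw [hadd]
    by_cases h2 : 2 ≤ A.count i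
    · have hD : (PySem.Dict.mk (pvCandItems A s)).insert i (A.count i : Int)
          = PySem.Dict.mk (pvCandItems A (s ++ [i])) := by
        apply PySem.Dict.ext
        rw [PySem.Dict.items_insert_of_not_contains _ _ hconf]
        simp [pvCandItems, pvCandList, List.filter_append, h2]
      have hsing : pvSingles A X (s ++ [i])
          = pvSingles A X s + (if 4 ≤ A.count i ∧ X ≤ i * i then 1 else 0) := by
        unfold pvSingles
        rw [List.filter_append]
        by_cases h4 : 4 ≤ A.count i <;> by_cases hx : X ≤ i * i <;>
          simp [h4, hx]
      unfold pvStepA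
      simp only [PySem.List.count_eq, hconf]
      rw [if_pos ⟨trivial, h2⟩]
      rw [hD, hsing, pow_two]
      by_cases h4 : 4 ≤ A.count i <;> by_cases hx : X ≤ i * i <;>
        simp [h4, hx] <;> ring
    · have hsame : pvCandItems A (s ++ [i]) = pvCandItems A s := by
        simp [pvCandItems, pvCandList, List.filter_append, h2]
      have hsing : pvSingles A X (s ++ [i]) = pvSingles A X s := by
        have h4 : ¬ 4 ≤ A.count i := by omega
        simp [pvSingles, List.filter_append, h4]
      unfold pvStepA
      simp [PySem.List.count_eq, h2, hsame, hsing]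

theorem pv_foldA (A : List Int) (X : Int) :
    ∀ (l s : List Int) (c : Int),
      l.foldl (pvStepA A X) (PySem.Dict.mk (pvCandItems A s), c + pvSingles A X s)
        = (PySem.Dict.mk (pvCandItems A (PySem.Set.update s l)),
           c + pvSingles A X (PySem.Set.update s l)) := by
  intro l
  induction l with
  | nil => intro s c; rfl
  | cons i l ih =>
      intro s c
      rw [List.foldl_cons, pv_stepA_eq]
      exact ih (PySem.Set.add s i) c

theorem pv_combs_foldl (X : Int) :
    ∀ (L : List Int) (c : Int),
      (pvCombs2 L).foldl (fun c l => if X ≤ l.1 * l.2 then c + 1 else c) c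
        = c + pvSuffixPairs X L := by
  intro L
  induction L with
  | nil => intro c; simp [pvCombs2, pvSuffixPairs]
  | cons a r ih =>
      intro c
      rw [pvCombs2, List.foldl_append, List.foldl_map, ih, pvSuffixPairs]
      rw [PySem.List.foldl_ite_add_one (p := fun b => X ≤ a * b)]
      rw [List.countP_eq_length_filter]
      ring

theorem pv_solution_eq (A : List Int) (X : Int) :
    solution A X =
      (let t := pvSingles A X (PySem.Set.ofList A)
                + pvSuffixPairs X (pvCandList A (PySem.Set.ofList A));
       if 1000000000 ≤ t then -1 else t) := by
  unfold solution
  rw [show ((PySem.Dict.empty : PySem.Dict Int Int), (0 : Int))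
        = (PySem.Dict.mk (pvCandItems A []), 0 + pvSingles A X []) from by
      norm_num [pvCandItems, pvCandList, pvSingles]
      rfl]
  rw [pv_foldA A X A [] 0]
  rw [show PySem.Set.update [] A = PySem.Set.ofList A from rfl]
  simp only []
  rw [pv_keys_candItems, pv_combs_foldl]
  norm_num

-- ---- B side ----

theorem pv_suffixPairs_perm (X : Int) {L L' : List Int} (h : L.Perm L') :
    pvSuffixPairs X L = pvSuffixPairs X L' := by
  induction h with
  | nil => rfl
  | cons x h ih =>
      simp only [pvSuffixPairs, ih, (h.filter _).length_eq]
  | swap x y l =>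
      simp only [pvSuffixPairs, List.filter_cons]
      by_cases hxy : X ≤ y * x <;> by_cases hyx : X ≤ x * y <;>
        first
          | (exfalso; rw [mul_comm] at hxy; omega)
          | (simp [hxy, hyx]; ring)
  | trans h1 h2 ih1 ih2 => omega
theorem pv_filter_length_boundary (t : Int) :
    ∀ (L : List Int) (r : Nat), r ≤ L.length →
      (∀ (i : Nat) (h : i < L.length), (L[i] < t ↔ i < r)) →
      (L.filter (fun b => decide (b < t))).length = r := by
  intro L
  induction L with
  | nil => intro r hr _; simpa using (Nat.le_zero.mp hr).symm
  | cons x L ih =>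
      intro r hr hprop
      have h0 := hprop 0 (by simp)
      cases r with
      | zero =>
          have hx : ¬ x < t := by simpa using h0
          have : (L.filter (fun b => decide (b < t))).length = 0 := by
            apply ih 0 (Nat.zero_le _)
            intro i hi
            have := hprop (i + 1) (by simpa using Nat.succ_lt_succ hi)
            simpa using this
          simpa [List.filter_cons, hx] using this
      | succ r' =>
          have hx : x < t := by simp at h0; omega
          have : (L.filter (fun b => decide (b < t))).length = r' := by
            apply ih r' (by simpa using hr)
            intro i hi
            have := hprop (i + 1) (by simpa using Nat.succ_lt_succ hi)
            simp at this ⊢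
            omega
          simp [List.filter_cons, hx, this]
theorem pv_pvLB_spec (S : List Int) (t : Int) (hs : S.Pairwise (· ≤ ·)) (j : Nat)
    (hj : j ≤ S.length) :
    ∀ (n lo hi : Nat), hi - lo ≤ n → lo ≤ hi → hi ≤ j →
      (∀ i, i < lo → S.getD i 0 < t) →
      (∀ i, hi ≤ i → i < j → ¬ S.getD i 0 < t) →
      pvLB S t lo hi = ((S.take j).filter (fun b => decide (b < t))).length := by
  have hmono : ∀ (a b : Nat), a ≤ b → b < S.length → S.getD a 0 ≤ S.getD b 0 := by
    intro a b hab hb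
    rcases Nat.eq_or_lt_of_le hab with rfl | hab
    · exact le_refl _
    · rw [List.getD_eq_getElem _ _ (lt_trans hab hb), List.getD_eq_getElem _ _ hb]
      exact List.pairwise_iff_getElem.mp hs a b _ _ hab
  have hbase : ∀ lo, lo ≤ j →
      (∀ i, i < lo → S.getD i 0 < t) →
      (∀ i, lo ≤ i → i < j → ¬ S.getD i 0 < t) →
      lo = ((S.take j).filter (fun b => decide (b < t))).length := by
    intro lo hlo h1 h2
    symm
    apply pv_filter_length_boundary t (S.take j) lo (by simp; omega)
    intro i hi'
    have hij : i < j := by simp at hi'; omega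
    have hilen : i < S.length := by omega
    rw [List.getElem_take]
    constructor
    · intro h
      by_contra hge
      exact (h2 i (by omega) hij) (by rwa [List.getD_eq_getElem _ _ hilen])
    · intro h
      have := h1 i h
      rwa [List.getD_eq_getElem _ _ hilen] at this
  intro n
  induction n with
  | zero =>
      intro lo hi hn hlo hhi h1 h2
      have heq : lo = hi := by omega
      subst heq
      rw [pvLB, if_neg (by omega)]
      exact hbase lo hhi h1 h2
  | succ n ih =>
      intro lo hi hn hlo hhi h1 h2
      by_cases hlt : lo < hi
      · rw [pvLB, if_pos hlt]
        have hmid2 : (lo + hi) / 2 < hi := by omega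
        by_cases hc : S.getD ((lo + hi) / 2) 0 < t
        · rw [if_pos hc]
          apply ih ((lo + hi) / 2 + 1) hi (by omega) (by omega) hhi
          · intro i hi'
            exact lt_of_le_of_lt (hmono i ((lo + hi) / 2) (by omega) (by omega)) hc
          · exact h2
        · rw [if_neg hc]
          apply ih lo ((lo + hi) / 2) (by omega) (by omega) (by omega) h1
          intro i hi' hij
          rcases Nat.lt_or_ge i hi with hlt' | hge
          · intro h
            exact hc (lt_of_le_of_lt (hmono ((lo + hi) / 2) i hi' (by omega)) h)
          · exact h2 i hge hij
      · rw [pvLB, if_neg hlt]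
        have heq : lo = hi := by omega
        subst heq
        exact hbase lo hhi h1 h2
theorem pv_contrib_pos (S : List Int) (X c : Int) (j : Nat) (hs : S.Pairwise (· ≤ ·))
    (hj : j ≤ S.length) (hc : 0 < c) :
    (j : Int) - (pvLB S (-(PySem.Int.floordiv (-X) c)) 0 j : Int)
      = (((S.take j).filter (fun b => decide (X ≤ b * c))).length : Int) := by
  set t := -(PySem.Int.floordiv (-X) c) with ht
  obtain ⟨h1t, h2t⟩ := (PySem.Int.neg_floordiv_neg_eq_iff_of_pos (a := X) (b := c) (q := t) hc).mp rfl
  have hiff : ∀ b : Int, (X ≤ b * c) ↔ ¬ (b < t) := by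
    intro b
    constructor
    · intro h hbt
      nlinarith
    · intro h
      push_neg at h
      nlinarith
  have hLB : pvLB S t 0 j = ((S.take j).filter (fun b => decide (b < t))).length :=
    pv_pvLB_spec S t hs j hj j 0 j (by omega) (by omega) (le_refl _)
      (by omega) (by omega)
  have hcongr : (S.take j).filter (fun b => decide (X ≤ b * c))
      = (S.take j).filter (fun b => ! decide (b < t)) := by
    apply List.filter_congr
    intro b _
    by_cases hb : b < t <;> simp [hb, hiff b] <;> omega
  have hsplit : ((S.take j).filter (fun b => decide (b < t))).length
      + ((S.take j).filter (fun b => ! decide (b < t))).length = j := by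
    have := List.length_eq_length_filter_add (l := S.take j) (fun b => decide (b < t))
    simp only [List.length_take] at this
    omega
  rw [hcongr, hLB]
  omega
theorem pv_contrib_neg (S : List Int) (X c : Int) (j : Nat) (hs : S.Pairwise (· ≤ ·))
    (hj : j ≤ S.length) (hc : c < 0) :
    (pvLB S (PySem.Int.floordiv X c + 1) 0 j : Int)
      = (((S.take j).filter (fun b => decide (X ≤ b * c))).length : Int) := by
  have hqr := PySem.Int.floordiv_mul_add_mod X c
  obtain ⟨hr1, hr2⟩ := PySem.Int.mod_neg_bounds (a := X) hc
  have hiff : ∀ b : Int, (X ≤ b * c) ↔ (b < PySem.Int.floordiv X c + 1) := by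
    intro b
    constructor
    · intro h
      by_contra hge
      push_neg at hge
      nlinarith
    · intro h
      nlinarith
  have hLB : pvLB S (PySem.Int.floordiv X c + 1) 0 j
      = ((S.take j).filter (fun b => decide (b < PySem.Int.floordiv X c + 1))).length :=
    pv_pvLB_spec S _ hs j hj j 0 j (by omega) (by omega) (le_refl _) (by omega) (by omega)
  rw [hLB]
  congr 2
  apply List.filter_congr
  intro b _
  simp [hiff b]
theorem pv_prefix_aux (X : Int) :
    ∀ (R P : List Int),
      ((PySem.List.enumerate R (P.length : Int)).map (fun p =>
          ((((P ++ R).take p.1.toNat).filter (fun b => decide (X ≤ b * p.2))).length : Int))).sum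
        = (R.map (fun c => ((P.filter (fun b => decide (X ≤ b * c))).length : Int))).sum
          + pvSuffixPairs X R := by
  intro R
  induction R with
  | nil => intro P; simp [PySem.List.enumerate_nil, pvSuffixPairs]
  | cons c r ih =>
      intro P
      rw [PySem.List.enumerate_cons, List.map_cons, List.sum_cons]
      have hhead : ((((P ++ c :: r).take ((P.length : Int)).toNat).filter
          (fun b => decide (X ≤ b * c))).length : Int)
          = ((P.filter (fun b => decide (X ≤ b * c))).length : Int) := by
        rw [Int.toNat_natCast, List.take_left]
      have happ : P ++ c :: r = (P ++ [c]) ++ r := by simp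
      have hP' : (P.length : Int) + 1 = ((P ++ [c]).length : Int) := by
        simp [List.length_append]
      rw [hhead, happ, hP', ih ((P ++ [c]))]
      have hsplit : ∀ d : Int,
          (((P ++ [c]).filter (fun b => decide (X ≤ b * d))).length : Int)
            = ((P.filter (fun b => decide (X ≤ b * d))).length : Int)
              + (if X ≤ c * d then (1 : Int) else 0) := by
        intro d
        rw [List.filter_append, List.length_append]
        by_cases h : X ≤ c * d <;> simp [h] <;> omega
      rw [List.map_congr_left (fun d _ => hsplit d), PySem.List.sum_map_add_int]
      have hite : (r.map (fun d => if X ≤ c * d then (1 : Int) else 0)).sum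
          = ((r.countP (fun b => decide (X ≤ c * b))) : Int) := by
        rw [show (fun d => if X ≤ c * d then (1 : Int) else 0)
              = (fun d => if (fun b => decide (X ≤ c * b)) d = true then (1 : Int) else 0) from by
            funext d; by_cases h : X ≤ c * d <;> simp [h]]
        exact PySem.List.sum_map_ite_one_zero _ _
      rw [hite, List.countP_eq_length_filter]
      simp only [pvSuffixPairs, List.map_cons, List.sum_cons]
      push_cast
      ring
theorem pv_foldB (S : List Int) (X : Int) (hs : S.Pairwise (· ≤ ·)) (c0 : Int) :
    (PySem.List.enumerate S).foldl (fun c p =>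
        if 0 < p.2 then c + (p.1 - (pvLB S (-(PySem.Int.floordiv (-X) p.2)) 0 p.1.toNat : Int))
        else if p.2 < 0 then c + (pvLB S (PySem.Int.floordiv X p.2 + 1) 0 p.1.toNat : Int)
        else if X ≤ 0 then c + p.1 else c) c0
      = c0 + pvSuffixPairs X S := by
  have hbody : ∀ (c : Int) (p : Int × Int), p ∈ PySem.List.enumerate S 0 →
      (if 0 < p.2 then c + (p.1 - (pvLB S (-(PySem.Int.floordiv (-X) p.2)) 0 p.1.toNat : Int))
       else if p.2 < 0 then c + (pvLB S (PySem.Int.floordiv X p.2 + 1) 0 p.1.toNat : Int)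
       else if X ≤ 0 then c + p.1 else c)
        = c + (((S.take p.1.toNat).filter (fun b => decide (X ≤ b * p.2))).length : Int) := by
    intro c p hp
    obtain ⟨k, hk, rfl⟩ := (PySem.List.mem_enumerate_iff _ _ _).mp hp
    have htn : ((0 : Int) + (k : Int)).toNat = k := by omega
    simp only [htn]
    by_cases hpos : 0 < S[k]
    · rw [if_pos hpos, ← pv_contrib_pos S X (S[k]) k hs (le_of_lt hk) hpos]
      have : ((0 : Int) + (k : Int)) = (k : Int) := by ring
      rw [this]
    · by_cases hneg : S[k] < 0
      · rw [if_neg hpos, if_pos hneg, ← pv_contrib_neg S X (S[k]) k hs (le_of_lt hk) hneg]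
      · have h0 : S[k] = 0 := by omega
        rw [if_neg hpos, if_neg hneg]
        by_cases hX : X ≤ 0
        · rw [if_pos hX]
          have : (S.take k).filter (fun b => decide (X ≤ b * S[k])) = S.take k := by
            apply List.filter_eq_self.mpr
            intro b _
            simp [h0, hX]
          rw [this, List.length_take]
          congr 1
          omega
        · rw [if_neg hX]
          have : (S.take k).filter (fun b => decide (X ≤ b * S[k])) = [] := by
            apply List.filter_eq_nil_iff.mpr
            intro b _
            simp [h0]
            omega
          simp [this]
  refine (PySem.List.foldl_congr_mem _ _ _ c0 hbody).trans ?_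
  rw [PySem.List.foldl_add
    (g := fun p : Int × Int => (((S.take p.1.toNat).filter (fun b => decide (X ≤ b * p.2))).length : Int))]
  have := pv_prefix_aux X S []
  simp only [List.length_nil, Nat.cast_zero, List.nil_append, List.filter_nil,
    List.length_nil] at this
  rw [this]
  simp
theorem pv_solution_alt_eq (A : List Int) (X : Int) :
    solution_alt A X =
      (let t := pvSingles A X (PySem.Set.ofList A)
                + pvSuffixPairs X (pvCandList A (PySem.Set.ofList A));
       if 1000000000 ≤ t then -1 else t) := by
  unfold solution_alt
  rw [PySem.Dict.foldl_insert_getD_add_one_eq_counter]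
  simp only []
  have hcand : ((PySem.Dict.counter A).items.filter (fun p => decide ((2 : Int) ≤ p.2))).map
        (fun p => p.1) = pvCandList A (PySem.Set.ofList A) := by
    rw [PySem.Dict.items_counter, List.filter_map, List.map_map]
    simp only [Function.comp_def, List.map_id_fun']
    unfold pvCandList
    apply List.filter_congr
    intro k _
    simp
  rw [hcand]
  have hpair : (PySem.List.sorted (pvCandList A (PySem.Set.ofList A)) (fun x => x) false).Pairwise (· ≤ ·) := by
    have := PySem.List.sorted_pairwise (xs := pvCandList A (PySem.Set.ofList A)) (key := fun x => x)
    simpa using this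
  have hperm : (PySem.List.sorted (pvCandList A (PySem.Set.ofList A)) (fun x => x) false).Perm
      (pvCandList A (PySem.Set.ofList A)) := PySem.List.sorted_perm _ _ _
  rw [PySem.List.foldl_ite_add_one
    (p := fun v => 4 ≤ (PySem.Dict.counter A).getD v 0 ∧ X ≤ v * v)]
  rw [pv_foldB _ X hpair]
  rw [pv_suffixPairs_perm X hperm]
  have hsing : ((List.countP (fun v => decide (4 ≤ (PySem.Dict.counter A).getD v 0 ∧ X ≤ v * v))
        (PySem.List.sorted (pvCandList A (PySem.Set.ofList A)) (fun x => x) false)) : Int)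
      = pvSingles A X (PySem.Set.ofList A) := by
    rw [hperm.countP_eq, List.countP_eq_length_filter]
    unfold pvCandList pvSingles
    rw [List.filter_filter]
    congr 2
    apply List.filter_congr
    intro k _
    by_cases h4 : 4 ≤ A.count k <;> by_cases hx : X ≤ k * k <;>
      simp [PySem.Dict.getD_counter, h4, hx] <;> omega
  rw [hsing]
  norm_num

-- ===== VERDICT (by name: the statement is the Claim_ definition above) =====
theorem solution_spec : Claim_equal_solution := by
  intro A X _
  unfold Spec_solution
  rw [pv_solution_eq, pv_solution_alt_eq]
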